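-- pv_equiv track=rewrite | github.com/GioTro/Competative_Programming_Solutions | Kattis/Python/asciiaddition.py | chop
-- ===== SOURCE A (Python) =====
-- def chop(l):
--     index, res = 0, []
--     while True:
--         s = ''
--         for i in l:
--             s += i[index:index + 5]
--         index += 6
--         res.append(s)
--         if (index > len(l[0])):
--             break
--     return res
-- ===== SOURCE B (Python) =====
-- def chop(l):
--     ncols = len(l[0]) // 6 + 1
--     buckets = [[] for _ in range(ncols)]
--     for row in l:
--         for pos, ch in enumerate(row):
--             q, r = divmod(pos, 6)
--             if r != 5 and q < ncols:
--                 buckets[q].append(ch)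
--     return [''.join(b) for b in buckets]
-- ===== Notes on version B (the rewrite author's own statement) =====
-- stated objective: alternative
-- what changed: A slices: for each output column it takes row[index:index+5] from every row and concatenates; B never slices: it makes one character-level pass over each row, computing divmod(pos,6) per character and appending it to bucket pos//6 (skipping remainder-5 separator characters), then joins the buckets.
-- outside the precondition, e.g. on chop([]): A raises IndexError, B raises IndexError
import Mathlib
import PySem

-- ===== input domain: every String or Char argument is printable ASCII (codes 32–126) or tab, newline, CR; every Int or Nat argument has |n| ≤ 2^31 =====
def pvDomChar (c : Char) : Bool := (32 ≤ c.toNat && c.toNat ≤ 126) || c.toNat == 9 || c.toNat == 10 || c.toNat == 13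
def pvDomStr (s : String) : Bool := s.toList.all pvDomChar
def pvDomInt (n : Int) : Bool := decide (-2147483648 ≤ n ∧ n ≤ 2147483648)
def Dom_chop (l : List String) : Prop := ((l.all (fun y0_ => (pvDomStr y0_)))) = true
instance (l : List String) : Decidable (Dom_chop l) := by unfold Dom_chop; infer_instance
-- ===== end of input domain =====

-- B replaces A's column-by-column slicing loop by a single character-level pass per row that
-- buckets each character by pos//6 (skipping separator positions pos%6==5); objective: alternative,
-- same cost class; equality of RETURN values on non-empty input is proved.

-- ===== PORT A =====
-- A's 'while True' loop: build column string s (the inner 'for i in l' loop is the foldl),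
-- advance index by 6, append, break when index > len(l[0]).
def chopLoopA (l : List String) (index : Nat) (res : List String) : List String :=
  let s := l.foldl (fun acc i =>
    acc ++ PySem.Str.slice i (some (index : Int)) (some ((index : Int) + 5))) ""
  if (index : Int) + 6 > PySem.Str.len (l.headD "") then res ++ [s]
  else chopLoopA l (index + 6) (res ++ [s])
termination_by (l.headD "").toList.length + 1 - index
decreasing_by
  simp only [PySem.Str.len_eq, not_lt] at *
  omega

-- l[0] raises IndexError on l = []; Pre_chop excludes that input, so headD's default is never read.
def chop (l : List String) : List String := chopLoopA l 0 []

-- ===== PORT B =====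
-- B: ncols = len(l[0]) // 6 + 1; buckets = [[] for _ in range(ncols)];
-- for row in l: for pos, ch in enumerate(row): q, r = divmod(pos, 6);
--   if r != 5 and q < ncols: buckets[q].append(ch);  return [''.join(b) for b in buckets].
-- len(l[0]) ≥ 0 and pos ≥ 0, so Python's // and % are exactly Nat division/modulo; enumerate(row)
-- is ported as row.toList.zipIdx (pairs (char, pos), pos from 0), exact on these nonneg indices.
def chop_alt (l : List String) : List String :=
  let ncols := (l.headD "").toList.length / 6 + 1
  let init : List (List Char) := List.replicate ncols []
  let buckets := l.foldl (fun bks row =>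
    row.toList.zipIdx.foldl (fun bks cp =>
      if cp.2 % 6 ≠ 5 ∧ cp.2 / 6 < ncols then bks.modify (cp.2 / 6) (· ++ [cp.1]) else bks)
      bks) init
  buckets.map String.ofList

-- ===== PRECONDITION & SPEC =====
-- Pre_ excludes only l = [], where the Python A raises IndexError on l[0].
def Pre_chop (l : List String) : Prop := l ≠ []
instance (l : List String) : Decidable (Pre_chop l) := by unfold Pre_chop; infer_instance
def pvWitness_chop : List String := ["ab cd", "ef gh"]
def Spec_chop (l : List String) (out : List String) : Prop := out = chop_alt l
instance (l : List String) (out : List String) : Decidable (Spec_chop l out) := by unfold Spec_chop; infer_instance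

-- ===== CLAIM (what is proved, stated in full; the proofs are below) =====
def Claim_equal_chop : Prop := ∀ (l : List String), Dom_chop l → Pre_chop l → Spec_chop l (chop l)

-- ===== LEMMAS AND PROOFS =====

-- the column string at offset j (what A's inner loop builds)
def colStr (l : List String) (j : Int) : String :=
  l.foldl (fun acc i => acc ++ PySem.Str.slice i (some j) (some (j + 5))) ""

set_option maxHeartbeats 1000000 in
lemma chopLoopA_eq (l : List String) (index : Nat) (res : List String)
    (h : index ≤ (l.headD "").toList.length) :
    chopLoopA l index res =
      res ++ (List.range (((l.headD "").toList.length - index) / 6 + 1)).map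
        (fun (k : Nat) => colStr l ((index : Int) + 6 * (k : Int))) := by
  generalize hn : (l.headD "").toList.length = n at *
  induction hd : n - index using Nat.strong_induction_on generalizing index res with
  | _ d ih =>
    subst hd
    rw [chopLoopA]
    simp only [PySem.Str.len_eq, hn]
    have hcol : (List.foldl (fun acc i =>
        acc ++ PySem.Str.slice i (some (index : Int)) (some ((index : Int) + 5))) "" l)
        = colStr l (index : Int) := rfl
    rw [hcol]
    by_cases hb : (index : Int) + 6 > (n : Int)
    · simp only [hb, if_true]
      have h6 : n - index < 6 := by omega
      have : (n - index) / 6 = 0 := by omega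
      rw [this]
      simp
    · simp only [hb, if_false]
      have h6 : index + 6 ≤ n := by omega
      rw [ih (n - (index + 6)) (by omega) (index + 6) (res ++ [colStr l index]) (by omega) rfl]
      have hsplit : (n - index) / 6 + 1 = ((n - (index + 6)) / 6 + 1) + 1 := by omega
      rw [hsplit]
      conv_rhs => rw [List.range_succ_eq_map]
      simp only [List.map_cons, List.map_map, List.append_assoc, List.singleton_append]
      refine congrArg (fun t => res ++ t) ?_
      refine congrArg₂ List.cons ?_ ?_
      · norm_num
      · apply List.map_congr_left
        intro k _
        simp only [Function.comp_apply]
        congr 1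
        push_cast
        ring

-- the characters B's pass (started at absolute position s) contributes to bucket q
def sel (s : Nat) (cs : List Char) (q : Nat) : List Char :=
  match cs with
  | [] => []
  | c :: cs => (if s % 6 ≠ 5 ∧ s / 6 = q then [c] else []) ++ sel (s + 1) cs q

lemma sel_eq (cs : List Char) : ∀ (s q : Nat),
    sel s cs q = (cs.drop (6 * q - s)).take (min 5 (6 * q + 5 - s)) := by
  induction cs with
  | nil => intro s q; simp [sel]
  | cons c cs ih =>
    intro s q
    rw [sel, ih (s + 1) q]
    by_cases h1 : s < 6 * q
    · have hg : ¬ (s % 6 ≠ 5 ∧ s / 6 = q) := by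
        rintro ⟨-, hq⟩; omega
      obtain ⟨m, hm⟩ : ∃ m, 6 * q - s = m + 1 := ⟨6 * q - s - 1, by omega⟩
      rw [if_neg hg, hm, List.drop_succ_cons]
      have : 6 * q - (s + 1) = m := by omega
      rw [this]
      have h5 : min 5 (6 * q + 5 - s) = 5 := by omega
      have h5' : min 5 (6 * q + 5 - (s + 1)) = 5 := by omega
      rw [h5, h5']
      simp
    · by_cases h2 : s ≤ 6 * q + 4
      · have hg : s % 6 ≠ 5 ∧ s / 6 = q := by omega
        rw [if_pos hg]
        have hd : 6 * q - s = 0 := by omega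
        have hd' : 6 * q - (s + 1) = 0 := by omega
        rw [hd, hd', List.drop_zero, List.drop_zero]
        obtain ⟨m, hm⟩ : ∃ m, min 5 (6 * q + 5 - s) = m + 1 := ⟨min 5 (6 * q + 5 - s) - 1, by omega⟩
        rw [hm, List.take_succ_cons]
        have : min 5 (6 * q + 5 - (s + 1)) = m := by omega
        rw [this]
        simp
      · have hg : ¬ (s % 6 ≠ 5 ∧ s / 6 = q) := by
          rintro ⟨h5, hq⟩; omega
        rw [if_neg hg]
        have hm : min 5 (6 * q + 5 - s) = 0 := by omega
        have hm' : min 5 (6 * q + 5 - (s + 1)) = 0 := by omega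
        rw [hm, hm']
        simp

-- one row of B's inner loop, seen per bucket
lemma inner_get (ncols : Nat) (cs : List Char) : ∀ (s : Nat) (bks : List (List Char)) (q : Nat),
    q < ncols →
    ((cs.zipIdx s).foldl (fun bks (cp : Char × Nat) =>
        if cp.2 % 6 ≠ 5 ∧ cp.2 / 6 < ncols then bks.modify (cp.2 / 6) (· ++ [cp.1]) else bks)
      bks)[q]?
    = bks[q]?.map (· ++ sel s cs q) := by
  induction cs with
  | nil => intro s bks q _; simp [sel]
  | cons c cs ih =>
    intro s bks q hq
    rw [List.zipIdx_cons, List.foldl_cons, ih (s + 1) _ q hq, sel]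
    by_cases hsel : s % 6 ≠ 5 ∧ s / 6 = q
    · have hg : s % 6 ≠ 5 ∧ s / 6 < ncols := ⟨hsel.1, hsel.2 ▸ hq⟩
      rw [if_pos hg, if_pos hsel, hsel.2, List.getElem?_modify]
      cases bks[q]? with
      | none => rfl
      | some b => simp
    · rw [if_neg hsel, List.nil_append]
      by_cases hg : s % 6 ≠ 5 ∧ s / 6 < ncols
      · rw [if_pos hg, List.getElem?_modify]
        have : s / 6 ≠ q := by tauto
        cases bks[q]? with
        | none => rfl
        | some b => simp [this]
      · rw [if_neg hg]

lemma inner_length (ncols : Nat) (cs : List (Char × Nat)) : ∀ (bks : List (List Char)),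
    (cs.foldl (fun bks (cp : Char × Nat) =>
        if cp.2 % 6 ≠ 5 ∧ cp.2 / 6 < ncols then bks.modify (cp.2 / 6) (· ++ [cp.1]) else bks)
      bks).length = bks.length := by
  induction cs with
  | nil => intro bks; rfl
  | cons c cs ih =>
    intro bks
    rw [List.foldl_cons, ih]
    split_ifs with h
    · exact List.length_modify ..
    · rfl

-- the whole outer loop, seen per bucket
lemma outer_get (ncols : Nat) (rows : List String) : ∀ (bks : List (List Char)) (q : Nat),
    q < ncols →
    (rows.foldl (fun bks row =>
        row.toList.zipIdx.foldl (fun bks (cp : Char × Nat) =>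
          if cp.2 % 6 ≠ 5 ∧ cp.2 / 6 < ncols then bks.modify (cp.2 / 6) (· ++ [cp.1]) else bks)
          bks) bks)[q]?
    = bks[q]?.map (· ++ (rows.map (fun row => sel 0 row.toList q)).flatten) := by
  induction rows with
  | nil =>
    intro bks q _
    simp
  | cons r rows ih =>
    intro bks q hq
    rw [List.foldl_cons, ih _ q hq, inner_get ncols _ 0 bks q hq]
    cases bks[q]? with
    | none => rfl
    | some b => simp

lemma outer_length (ncols : Nat) (rows : List String) : ∀ (bks : List (List Char)),
    (rows.foldl (fun bks row =>
        row.toList.zipIdx.foldl (fun bks (cp : Char × Nat) =>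
          if cp.2 % 6 ≠ 5 ∧ cp.2 / 6 < ncols then bks.modify (cp.2 / 6) (· ++ [cp.1]) else bks)
          bks) bks).length = bks.length := by
  induction rows with
  | nil => intro bks; rfl
  | cons r rows ih => intro bks; rw [List.foldl_cons, ih, inner_length]

lemma colStr_toList (l : List String) (j : Nat) :
    (colStr l ((j : Int))).toList =
      (l.map (fun row => (row.toList.drop j).take 5)).flatten := by
  unfold colStr
  induction l using List.reverseRecOn with
  | nil => rfl
  | append_singleton xs x ih =>
    simp only [List.foldl_append, List.foldl_cons, List.foldl_nil, List.map_append,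
      List.map_cons, List.map_nil, List.flatten_append, String.toList_append, ih]
    congr 1
    rw [PySem.Str.toList_slice]
    simp only [PySem.Chars.slice_eq_listSlice]
    have : ((j : Int) + 5) = ((j : Int) + ((5 : Nat) : Int)) := by norm_num
    rw [this, PySem.List.slice_natCast_add]
    simp

-- ===== VERDICT (by name: the statement is the Claim_ definition above) =====
theorem chop_spec : Claim_equal_chop := by
  intro l _hdom _hpre
  unfold Spec_chop chop chop_alt
  dsimp only
  rw [chopLoopA_eq l 0 [] (by omega)]
  set n : Nat := (l.headD "").toList.length with hn
  set ncols : Nat := n / 6 + 1 with hncols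
  have hzero : (n - 0) / 6 + 1 = ncols := by omega
  rw [hzero, List.nil_append]
  apply List.ext_getElem
  · simp [outer_length]
  · intro k h1 h2
    have hk : k < ncols := by simpa using h1
    simp only [List.getElem_map, List.getElem_range]
    have hget := outer_get ncols l (List.replicate ncols []) k hk
    have hrep : (List.replicate ncols ([] : List Char))[k]? = some [] :=
      List.getElem?_eq_getElem (by simpa using hk) |>.trans (by simp)
    rw [hrep] at hget
    simp only [Option.map_some, List.nil_append] at hget
    obtain ⟨hlt, hgetE⟩ := List.getElem?_eq_some_iff.mp hget
    rw [hgetE]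
    apply String.toList_inj.mp
    have hcol : (((0 : Nat) : Int) + 6 * (k : Int)) = (((6 * k : Nat) : Int)) := by push_cast; ring
    rw [hcol, colStr_toList l (6 * k), String.toList_ofList]
    congr 1
    apply List.map_congr_left
    intro row _
    rw [sel_eq]
    simp only [Nat.sub_zero]
    have hmin : min 5 (6 * k + 5) = 5 := by omega
    rw [hmin]
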